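-- pv_equiv track=rewrite | github.com/KibyPoyo/AdventOfCode2024 | jour25/jour25.py | fichier_to_tab
-- ===== SOURCE A (Python) =====
-- def fichier_to_tab(fichier):
--     tab = []
--     pattern = []
--
--     for line in fichier:
--         line = line.strip()
--         if line == '':
--             tab.append(pattern)
--             pattern = []
--         else:
--             pattern.append([char for char in line])
--
--     if pattern != []:
--         tab.append(pattern)
--
--     return tab
-- ===== SOURCE B (Python) =====
-- def fichier_to_tab(fichier):
--     # Two-phase: strip all lines first, then cut the list at blank lines
--     # by searching for each separator and slicing out whole blocks at once.
--     lines = [l.strip() for l in fichier]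
--     tab = []
--     while '' in lines:
--         k = lines.index('')
--         tab.append([list(line) for line in lines[:k]])
--         lines = lines[k + 1:]
--     if lines:
--         tab.append([list(line) for line in lines])
--     return tab
-- ===== Notes on version B (the rewrite author's own statement) =====
-- stated objective: alternative
-- what changed: B strips all lines first, then repeatedly searches for the next blank line (index) and slices out a whole block at once, instead of A's per-line running accumulator with flush-on-blank.
import Mathlib
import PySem

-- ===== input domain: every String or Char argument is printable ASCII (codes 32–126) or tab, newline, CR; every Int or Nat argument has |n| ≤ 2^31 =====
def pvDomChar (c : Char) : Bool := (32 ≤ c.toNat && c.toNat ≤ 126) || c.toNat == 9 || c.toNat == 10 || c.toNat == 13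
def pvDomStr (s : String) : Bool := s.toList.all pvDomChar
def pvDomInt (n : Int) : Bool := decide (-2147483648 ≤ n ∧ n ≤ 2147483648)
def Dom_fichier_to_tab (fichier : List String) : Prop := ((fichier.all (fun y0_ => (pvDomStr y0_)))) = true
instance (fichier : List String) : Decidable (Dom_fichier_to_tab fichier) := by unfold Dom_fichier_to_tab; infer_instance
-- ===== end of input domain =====

-- B: two-phase block split — strip all lines, then repeatedly find the next blank line and slice
-- out a whole block — instead of A's per-line accumulator flush; objective: alternative, same cost.


-- ===== PORT A =====
-- [char for char in line] : the list of one-character strings of line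
def pvChars (s : String) : List String := s.toList.map (fun c => String.ofList [c])

def fichier_to_tab (fichier : List String) : List (List (List String)) :=
  let st := fichier.foldl
    (fun (acc : List (List (List String)) × List (List String)) line =>
      let line := PySem.Str.strip line
      if line == "" then (acc.1 ++ [acc.2], ([] : List (List String)))
      else (acc.1, acc.2 ++ [pvChars line]))
    ([], [])
  if st.2 ≠ [] then st.1 ++ [st.2] else st.1

-- ===== PORT B =====
-- the while loop of Source B: `'' in lines` is `index? lines '' = some k` (membership = index? succeeds)
def pvAltLoop (tab : List (List (List String))) (lines : List String) :
    List (List (List String)) :=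
  match h : PySem.List.index? lines "" with
  | some k =>
      pvAltLoop (tab ++ [(PySem.List.slice lines none (some (k : Int))).map pvChars])
                (PySem.List.slice lines (some ((k : Int) + 1)) none)
  | none => if lines ≠ [] then tab ++ [lines.map pvChars] else tab
termination_by lines.length
decreasing_by
  obtain ⟨hk, -, -⟩ := PySem.List.getElem_of_index?_eq_some h
  rw [PySem.List.slice_from lines (show (0:Int) ≤ (k:Int)+1 by omega)]
  simp only [List.length_drop]
  omega

def fichier_to_tab_alt (fichier : List String) : List (List (List String)) :=
  pvAltLoop [] (fichier.map (fun l => PySem.Str.strip l))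

-- ===== PRECONDITION & SPEC =====
def Spec_fichier_to_tab (fichier : List String) (out : List (List (List String))) : Prop := out = fichier_to_tab_alt fichier
instance (fichier : List String) (out : List (List (List String))) : Decidable (Spec_fichier_to_tab fichier out) := by unfold Spec_fichier_to_tab; infer_instance

-- ===== CLAIM (what is proved, stated in full; the proofs are below) =====
def Claim_equal_fichier_to_tab : Prop := ∀ (fichier : List String), Dom_fichier_to_tab fichier → Spec_fichier_to_tab fichier (fichier_to_tab fichier)

-- ===== LEMMAS AND PROOFS =====

-- common recursive characterisation: flush-on-blank over already-stripped lines
def pvF (pat : List (List String)) : List String → List (List (List String))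
  | [] => if pat ≠ [] then [pat] else []
  | l :: ls => if l == "" then pat :: pvF [] ls else pvF (pat ++ [pvChars l]) ls

-- the body of A's fold, on an already-stripped line, and its final flush
def pvStepS (acc : List (List (List String)) × List (List String)) (l : String) :
    List (List (List String)) × List (List String) :=
  if l == "" then (acc.1 ++ [acc.2], []) else (acc.1, acc.2 ++ [pvChars l])

def pvFinish (st : List (List (List String)) × List (List String)) :
    List (List (List String)) :=
  if st.2 ≠ [] then st.1 ++ [st.2] else st.1

lemma pvA_foldl (ls : List String) :
    ∀ (tab : List (List (List String))) (pat : List (List String)),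
      pvFinish (ls.foldl pvStepS (tab, pat)) = tab ++ pvF pat ls := by
  induction ls with
  | nil =>
    intro tab pat
    simp only [List.foldl_nil, pvF, pvFinish]
    by_cases hp : pat = [] <;> simp [hp]
  | cons l ls ih =>
    intro tab pat
    simp only [List.foldl_cons, pvF, pvStepS]
    by_cases hl : (l == "") = true
    · simp only [hl, if_true, ih, List.append_assoc, List.singleton_append]
    · simp only [hl, Bool.false_eq_true, if_false, ih]

lemma pvF_no_blank (ls : List String) (hnb : "" ∉ ls) :
    ∀ pat, pvF pat ls =
      if pat ++ ls.map pvChars = [] then [] else [pat ++ ls.map pvChars] := by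
  induction ls with
  | nil =>
    intro pat
    simp only [pvF, List.map_nil, List.append_nil]
    by_cases hp : pat = [] <;> simp [hp]
  | cons l ls ih =>
    intro pat
    have hl : (l == "") = false := by
      simp only [List.mem_cons, not_or] at hnb
      simp; exact fun h => hnb.1 h.symm
    have hnb' : "" ∉ ls := by simp only [List.mem_cons, not_or] at hnb; exact hnb.2
    simp only [pvF, hl, Bool.false_eq_true, if_false, ih hnb', List.map_cons]
    simp

lemma pvF_split (pre : List String) (suf : List String) (hnb : "" ∉ pre) :
    ∀ pat, pvF pat (pre ++ "" :: suf) = (pat ++ pre.map pvChars) :: pvF [] suf := by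
  induction pre with
  | nil => intro pat; simp [pvF]
  | cons l pre ih =>
    intro pat
    have hl : (l == "") = false := by
      simp only [List.mem_cons, not_or] at hnb
      simp; exact fun h => hnb.1 h.symm
    have hnb' : "" ∉ pre := by simp only [List.mem_cons, not_or] at hnb; exact hnb.2
    simp only [List.cons_append, pvF, hl, Bool.false_eq_true, if_false, ih hnb', List.map_cons]
    simp

lemma pvAltLoop_eq (n : Nat) : ∀ (ls : List String), ls.length ≤ n →
    ∀ tab, pvAltLoop tab ls = tab ++ pvF [] ls := by
  induction n with
  | zero =>
    intro ls hls tab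
    have : ls = [] := List.length_eq_zero_iff.mp (Nat.le_zero.mp hls)
    subst this
    rw [pvAltLoop]
    simp [PySem.List.index?_eq_idxOf?, pvF]
  | succ n ih =>
    intro ls hls tab
    rw [pvAltLoop]
    split
    · rename_i k h
      obtain ⟨pre, suf, hsplit, hlen, hpre⟩ := (PySem.List.index?_eq_some_iff ls "" k).mp h
      have htake : PySem.List.slice ls none (some (k : Int)) = pre := by
        rw [PySem.List.slice_to_natCast, hsplit, ← hlen, List.take_left]
      have hdrop : PySem.List.slice ls (some ((k : Int) + 1)) none = suf := by
        rw [PySem.List.slice_from ls (show (0:Int) ≤ (k:Int)+1 by omega), hsplit, ← hlen]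
        have h2 : ((pre.length : Int) + 1).toNat = (pre ++ [""]).length := by
          simp
        rw [h2, show pre ++ "" :: suf = (pre ++ [""]) ++ suf by simp,
            List.drop_left]
      rw [htake, hdrop]
      have hlt : suf.length ≤ n := by
        have : ls.length = pre.length + 1 + suf.length := by
          simp [hsplit]; omega
        omega
      rw [ih suf hlt, hsplit, pvF_split pre suf hpre []]
      simp
    · rename_i h
      have hnb : "" ∉ ls := (PySem.List.index?_eq_none_iff ls "").mp h
      rw [pvF_no_blank ls hnb []]
      by_cases hl : ls = []
      · simp [hl]
      · have : ls.map pvChars ≠ [] := by simp [hl]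
        simp [hl, this]

-- ===== VERDICT (by name: the statement is the Claim_ definition above) =====
theorem fichier_to_tab_spec : Claim_equal_fichier_to_tab := by
  intro fichier _
  show fichier_to_tab fichier = fichier_to_tab_alt fichier
  unfold fichier_to_tab fichier_to_tab_alt
  rw [pvAltLoop_eq (fichier.map (fun l => PySem.Str.strip l)).length _ le_rfl []]
  have h := pvA_foldl (fichier.map (fun l => PySem.Str.strip l)) [] []
  rw [List.foldl_map] at h
  simpa [pvStepS, pvFinish] using h
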